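-- pv_equiv track=rewrite | github.com/zloyvetal/children | Exercises.py | what_to_do
-- ===== SOURCE A (Python) =====
-- def is_int(s):
--     try:
--         int(s)
--         return True
--     except ValueError:
--         return False
--
-- def what_to_do(data: list) -> int:
--     stat_man = True
--     value = data
--     number = int()
--     b = []
--     for x in value:
--         if is_int(x):
--             b.append(int(x))
--         else:
--             b.extend(x)
--
--     value = b
--
--     for i in value:
--         if type(i) == int:
--             if stat_man:
--                 number += i
--             elif not stat_man:
--                 number -= i
--         elif type(i) != int:
--             if i == '+':
--                 stat_man = True
--             elif i == '-':
--                 if stat_man: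
--                     stat_man = False
--                 elif not stat_man:
--                     stat_man = True
--     return number
-- ===== SOURCE B (Python) =====
-- def is_int(s):
--     try:
--         int(s)
--         return True
--     except ValueError:
--         return False
--
-- def what_to_do(data: list) -> int:
--     number = 0
--     sign = 1
--     for x in data:
--         if is_int(x):
--             number += sign * int(x)
--         else:
--             for c in x:
--                 if c == '+':
--                     sign = 1
--                 elif c == '-':
--                     sign = -sign
--     return number
-- ===== Notes on version B (the rewrite author's own statement) =====
-- stated objective: simpler
-- what changed: B fuses A's two passes (flatten into a mixed int/char list, then fold with a boolean flag) into one pass over the input with an integer sign accumulator (sign*int(x) instead of add/subtract branches); no intermediate list is built.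
import Mathlib
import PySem

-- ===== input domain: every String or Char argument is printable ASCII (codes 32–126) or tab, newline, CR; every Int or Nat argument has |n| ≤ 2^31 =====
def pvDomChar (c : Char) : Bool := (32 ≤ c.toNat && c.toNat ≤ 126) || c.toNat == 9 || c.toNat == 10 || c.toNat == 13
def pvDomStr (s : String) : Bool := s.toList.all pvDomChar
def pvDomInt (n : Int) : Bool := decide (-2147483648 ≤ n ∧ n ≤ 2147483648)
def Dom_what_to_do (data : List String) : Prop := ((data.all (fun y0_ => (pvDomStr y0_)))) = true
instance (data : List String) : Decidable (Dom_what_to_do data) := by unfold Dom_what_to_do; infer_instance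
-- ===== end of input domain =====

-- B fuses A's two passes (flatten to a mixed int/char list, then fold with a boolean flag)
-- into one pass with an integer sign accumulator; same return value, proved below.


-- ===== PORT A =====
-- first loop body: append int(x) if is_int(x), else extend with x's characters
def pvItems (x : String) : List (Int ⊕ Char) :=
  match PySem.Int.ofStr? x with
  | some n => [Sum.inl n]
  | none => x.toList.map Sum.inr

-- second loop body: ints add/subtract by the flag; '+' sets it, '-' toggles it
def pvStepA (st : Int × Bool) (i : Int ⊕ Char) : Int × Bool :=
  match i with
  | Sum.inl n => (if st.2 then st.1 + n else st.1 - n, st.2)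
  | Sum.inr c =>
      if c = '+' then (st.1, true)
      else if c = '-' then (if st.2 then (st.1, false) else (st.1, true))
      else st

def what_to_do (data : List String) : Int :=
  let b := data.foldl (fun acc x => acc ++ pvItems x) ([] : List (Int ⊕ Char))
  (b.foldl pvStepA ((0 : Int), true)).1

-- ===== PORT B =====
def pvStepBc (st : Int × Int) (c : Char) : Int × Int :=
  if c = '+' then (st.1, 1)
  else if c = '-' then (st.1, -st.2)
  else st

def pvStepB (st : Int × Int) (x : String) : Int × Int :=
  match PySem.Int.ofStr? x with
  | some n => (st.1 + st.2 * n, st.2)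
  | none => x.toList.foldl pvStepBc st

def what_to_do_alt (data : List String) : Int :=
  (data.foldl pvStepB ((0 : Int), (1 : Int))).1

-- ===== PRECONDITION & SPEC =====
def Spec_what_to_do (data : List String) (out : Int) : Prop := out = what_to_do_alt data
instance (data : List String) (out : Int) : Decidable (Spec_what_to_do data out) := by unfold Spec_what_to_do; infer_instance

-- ===== CLAIM (what is proved, stated in full; the proofs are below) =====
def Claim_equal_what_to_do : Prop := ∀ (data : List String), Dom_what_to_do data → Spec_what_to_do data (what_to_do data)

-- ===== LEMMAS AND PROOFS =====
-- the state relation: same number, sign encodes the flag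
def pvRel (a : Int × Bool) (b : Int × Int) : Prop :=
  b.1 = a.1 ∧ b.2 = (if a.2 then 1 else -1)

theorem pv_flatten (l : List String) (acc : List (Int ⊕ Char)) :
    l.foldl (fun acc x => acc ++ pvItems x) acc = acc ++ l.flatMap pvItems := by
  induction l generalizing acc with
  | nil => simp
  | cons x xs ih => simp [List.foldl_cons, ih, List.flatMap_cons]

theorem pv_char_step (a : Int × Bool) (b : Int × Int) (c : Char) (h : pvRel a b) :
    pvRel (pvStepA a (Sum.inr c)) (pvStepBc b c) := by
  obtain ⟨h1, h2⟩ := h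
  simp only [pvStepA, pvStepBc]
  split_ifs with hp hm <;> cases a.2 <;> simp_all [pvRel]

theorem pv_char_fold (cs : List Char) (a : Int × Bool) (b : Int × Int) (h : pvRel a b) :
    pvRel ((cs.map Sum.inr).foldl pvStepA a) (cs.foldl pvStepBc b) := by
  induction cs generalizing a b with
  | nil => exact h
  | cons c cs ih => exact ih _ _ (pv_char_step a b c h)

theorem pv_string_step (x : String) (a : Int × Bool) (b : Int × Int) (h : pvRel a b) :
    pvRel ((pvItems x).foldl pvStepA a) (pvStepB b x) := by
  obtain ⟨h1, h2⟩ := h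
  unfold pvItems pvStepB
  cases hx : PySem.Int.ofStr? x with
  | some n =>
      simp only [List.foldl_cons, List.foldl_nil, pvStepA]
      cases ha : a.2 <;> simp_all [pvRel] <;> ring
  | none => exact pv_char_fold x.toList a b ⟨h1, h2⟩

theorem pv_main (l : List String) (a : Int × Bool) (b : Int × Int) (h : pvRel a b) :
    pvRel ((l.flatMap pvItems).foldl pvStepA a) (l.foldl pvStepB b) := by
  induction l generalizing a b with
  | nil => exact h
  | cons x xs ih =>
      simp only [List.flatMap_cons, List.foldl_append, List.foldl_cons]
      exact ih _ _ (pv_string_step x a b h)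

-- ===== VERDICT (by name: the statement is the Claim_ definition above) =====
theorem what_to_do_spec : Claim_equal_what_to_do := by
  intro data _
  unfold Spec_what_to_do what_to_do what_to_do_alt
  rw [pv_flatten, List.nil_append]
  exact (pv_main data (0, true) (0, 1) ⟨rfl, rfl⟩).1.symm
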